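-- pv_equiv track=rewrite | github.com/KMFODA/arbos | arbos/env.py | _apply_env_key_comment_block
-- ===== SOURCE A (Python) =====
-- def _apply_env_key_comment_block(lines: list[str], key: str, value_line: str, comment_text: str) -> list[str]:
--     """Insert or update ``# comment`` + ``KEY=...`` block in .env-style lines."""
--     assign_prefix = f'{key}='
--     idx = None
--     for (i, line) in enumerate(lines):
--         stripped = line.split('#', 1)[0].strip()
--         if stripped.startswith(assign_prefix):
--             idx = i
--             break
--     comment_line = f'# {comment_text}'.rstrip()
--     if idx is None:
--         out = list(lines)
--         if out and out[-1].strip():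
--             out.append('')
--         out.append(comment_line)
--         out.append(value_line)
--         return out
--     out = list(lines)
--     if idx > 0 and out[idx - 1].strip().startswith('#'):
--         out[idx - 1] = comment_line
--         out[idx] = value_line
--     else:
--         out.insert(idx, comment_line)
--         out[idx + 1] = value_line
--     return out
-- ===== SOURCE B (Python) =====
-- def _apply_env_key_comment_block(lines: list[str], key: str, value_line: str, comment_text: str) -> list[str]:
--     """Insert or update ``# comment`` + ``KEY=...`` block in .env-style lines."""
--     prefix = f'{key}='
--     comment_line = f'# {comment_text}'.rstrip()
--     out = []
--     found = False
--     for line in lines: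
--         if not found and line.split('#', 1)[0].strip().startswith(prefix):
--             found = True
--             if out and out[-1].strip().startswith('#'):
--                 out[-1] = comment_line
--             else:
--                 out.append(comment_line)
--             out.append(value_line)
--         else:
--             out.append(line)
--     if not found:
--         if out and out[-1].strip():
--             out.append('')
--         out.append(comment_line)
--         out.append(value_line)
--     return out
-- ===== Notes on version B (the rewrite author's own statement) =====
-- stated objective: alternative
-- what changed: Replaces A's two-phase structure (index search, then insert/__setitem__ index arithmetic on a copy) with a single forward pass that copies lines into a fresh output list and patches the comment+value block in place at the first match via a found-flag and a last-emitted-line lookback; no indices, no list.insert.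
import Mathlib
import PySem

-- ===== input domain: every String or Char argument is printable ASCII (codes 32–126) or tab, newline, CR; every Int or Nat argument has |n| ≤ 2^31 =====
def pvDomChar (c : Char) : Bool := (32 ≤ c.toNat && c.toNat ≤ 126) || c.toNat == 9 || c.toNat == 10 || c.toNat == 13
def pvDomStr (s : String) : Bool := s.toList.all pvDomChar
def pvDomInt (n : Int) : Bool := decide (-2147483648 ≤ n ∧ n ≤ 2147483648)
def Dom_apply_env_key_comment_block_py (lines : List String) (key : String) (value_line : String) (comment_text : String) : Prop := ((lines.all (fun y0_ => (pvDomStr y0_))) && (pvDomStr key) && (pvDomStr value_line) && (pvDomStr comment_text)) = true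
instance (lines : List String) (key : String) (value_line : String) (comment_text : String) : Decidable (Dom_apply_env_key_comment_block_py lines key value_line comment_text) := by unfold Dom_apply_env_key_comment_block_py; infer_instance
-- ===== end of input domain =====

-- B replaces A's two-phase index search plus insert/__setitem__ index arithmetic by a
-- single forward pass with a found-flag that patches the block as it copies the lines
-- (objective: alternative decomposition, same behaviour, same O(n) cost).

-- `line.split('#', 1)[0].strip().startswith(key + '=')` — shared by both Pythons verbatim
def pvMatches (key line : String) : Bool :=
  PySem.Str.startswith
    (PySem.Str.strip (((PySem.Str.splitMax? line "#" 1).getD [line]).headD line))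
    (key ++ "=")

-- `prev.strip().startswith('#')`
def pvIsCom (s : String) : Bool := PySem.Str.startswith (PySem.Str.strip s) "#"

-- ===== PORT A =====
-- A's `for (i, line) in enumerate(lines): … break` index search
def pvFindIdx (key : String) : List String → Option Nat
  | [] => none
  | l :: ls => if pvMatches key l then some 0 else (pvFindIdx key ls).map (· + 1)

def apply_env_key_comment_block_py (lines : List String) (key : String) (value_line : String) (comment_text : String) : List String :=
  let comment_line := PySem.Str.rstrip ("# " ++ comment_text)
  match pvFindIdx key lines with
  | none =>
      let out := lines
      let out := if out ≠ [] ∧ PySem.Str.strip (out.getLastD "") ≠ "" then out ++ [""] else out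
      out ++ [comment_line, value_line]
  | some idx =>
      if idx > 0 ∧ pvIsCom (lines.getD (idx - 1) "") then
        (lines.set (idx - 1) comment_line).set idx value_line
      else
        (PySem.List.insert lines (idx : Int) comment_line).set (idx + 1) value_line

-- ===== PORT B =====
-- B's loop body: copy `line`, or patch the comment+value block at the first match
def pvStep (key c v : String) (st : List String × Bool) (line : String) : List String × Bool :=
  let out := st.1
  let found := st.2
  if !found && pvMatches key line then
    -- `out[-1] = comment_line` / `out.append(comment_line)`, then `out.append(value_line)`
    (((if out ≠ [] ∧ pvIsCom (PySem.List.pyGetD out (-1) "") then out.dropLast ++ [c] else out ++ [c]) ++ [v]), true)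
  else
    (out ++ [line], found)

def apply_env_key_comment_block_py_alt (lines : List String) (key : String) (value_line : String) (comment_text : String) : List String :=
  let c := PySem.Str.rstrip ("# " ++ comment_text)
  let st := lines.foldl (pvStep key c value_line) ([], false)
  if !st.2 then
    (if st.1 ≠ [] ∧ PySem.Str.strip (st.1.getLastD "") ≠ "" then st.1 ++ [""] else st.1) ++ [c, value_line]
  else st.1

-- ===== PRECONDITION & SPEC =====
def Spec_apply_env_key_comment_block_py (lines : List String) (key : String) (value_line : String) (comment_text : String) (out : List String) : Prop := out = apply_env_key_comment_block_py_alt lines key value_line comment_text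
instance (lines : List String) (key : String) (value_line : String) (comment_text : String) (out : List String) : Decidable (Spec_apply_env_key_comment_block_py lines key value_line comment_text out) := by unfold Spec_apply_env_key_comment_block_py; infer_instance

-- ===== CLAIM (what is proved, stated in full; the proofs are below) =====
def Claim_equal_apply_env_key_comment_block_py : Prop := ∀ (lines : List String) (key : String) (value_line : String) (comment_text : String), Dom_apply_env_key_comment_block_py lines key value_line comment_text → Spec_apply_env_key_comment_block_py lines key value_line comment_text (apply_env_key_comment_block_py lines key value_line comment_text)

-- ===== LEMMAS AND PROOFS =====

-- A's idx-found branch as a function of the list and the (positive) index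
def pvPatchA (c v : String) (l : List String) (j : Nat) : List String :=
  if pvIsCom (l.getD (j - 1) "") then (l.set (j - 1) c).set j v
  else (PySem.List.insert l (j : Int) c).set (j + 1) v

theorem pvFindIdx_lt_length (key : String) (l : List String) (j : Nat)
    (h : pvFindIdx key l = some j) : j < l.length := by
  induction l generalizing j with
  | nil => simp [pvFindIdx] at h
  | cons a t ih =>
      simp only [pvFindIdx] at h
      split at h
      · obtain rfl : (0 : Nat) = j := Option.some_inj.mp h
        simp
      · rcases Option.map_eq_some_iff.mp h with ⟨m, hm, rfl⟩
        have := ih m hm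
        simp
        omega

theorem pvPatchA_cons (c v h : String) (t : List String) (k : Nat)
    (hk : k + 1 ≤ t.length) :
    pvPatchA c v (h :: t) (k + 2) = h :: pvPatchA c v t (k + 1) := by
  have h1 : PySem.List.insert (h :: t) ((k + 2 : Nat) : Int) c
      = (h :: t).take (k + 2) ++ c :: (h :: t).drop (k + 2) :=
    PySem.List.insert_natCast _ _ _ (by simp; omega)
  have h2 : PySem.List.insert t ((k + 1 : Nat) : Int) c
      = t.take (k + 1) ++ c :: t.drop (k + 1) :=
    PySem.List.insert_natCast _ _ _ (by omega)
  simp only [pvPatchA]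
  rw [h1, h2]
  simp [List.getD]
  have e : k + 1 + 1 - min (k + 1) t.length = k + 2 - min (k + 1) t.length := by omega
  rw [e]
  split <;> rfl

theorem pvFoldl_found (key c v : String) (l : List String) (out : List String) :
    l.foldl (pvStep key c v) (out, true) = (out ++ l, true) := by
  induction l generalizing out with
  | nil => simp
  | cons a t ih => simp [pvStep, ih]

theorem pvFoldl_notfound (key c v : String) (l : List String) (acc : List String) :
    l.foldl (pvStep key c v) (acc, false) =
      (match pvFindIdx key l with
       | none => (acc ++ l, false)
       | some 0 =>
           ((if acc ≠ [] ∧ pvIsCom (PySem.List.pyGetD acc (-1) "") then acc.dropLast ++ [c] else acc ++ [c]) ++ [v] ++ l.tail, true)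
       | some (j + 1) => (acc ++ pvPatchA c v l (j + 1), true)) := by
  induction l generalizing acc with
  | nil => simp [pvFindIdx]
  | cons a t ih =>
      by_cases ha : pvMatches key a
      · have hfi : pvFindIdx key (a :: t) = some 0 := by simp [pvFindIdx, ha]
        rw [hfi]
        simp only [List.foldl_cons, pvStep, Bool.not_false, ha, Bool.and_self]
        simp [pvFoldl_found]
      · have hfi : pvFindIdx key (a :: t) = (pvFindIdx key t).map (· + 1) := by
          simp [pvFindIdx, ha]
        rw [hfi]
        have hstep : pvStep key c v (acc, false) a = (acc ++ [a], false) := by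
          simp [pvStep, ha]
        rw [List.foldl_cons, hstep, ih (acc ++ [a])]
        cases hft : pvFindIdx key t with
        | none => simp
        | some m =>
            cases m with
            | zero =>
                rcases t with _ | ⟨b, t'⟩
                · simp [pvFindIdx] at hft
                · simp only [Option.map_some, List.tail_cons]
                  rw [PySem.List.pyGetD_neg_one_append_singleton]
                  by_cases hcom : pvIsCom a
                  · simp [hcom, pvPatchA, List.getD]
                  · have hins : PySem.List.insert (a :: b :: t') ((1 : Nat) : Int) c
                        = (a :: b :: t').take 1 ++ c :: (a :: b :: t').drop 1 :=
                      PySem.List.insert_natCast _ _ _ (by simp)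
                    simp only [Nat.cast_one] at hins
                    simp [hcom, pvPatchA, List.getD, hins]
            | succ k =>
                have hlen : k + 1 ≤ t.length := Nat.le_of_lt (pvFindIdx_lt_length key t _ hft)
                simp only [Option.map_some]
                rw [show k + 1 + 1 = k + 2 from rfl, pvPatchA_cons c v a t k hlen]
                simp

-- ===== VERDICT (by name: the statement is the Claim_ definition above) =====
theorem apply_env_key_comment_block_py_spec : Claim_equal_apply_env_key_comment_block_py := by
  intro lines key value_line comment_text _
  unfold Spec_apply_env_key_comment_block_py
  simp only [apply_env_key_comment_block_py, apply_env_key_comment_block_py_alt]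
  generalize PySem.Str.rstrip ("# " ++ comment_text) = c
  rw [pvFoldl_notfound key c value_line lines []]
  cases hfi : pvFindIdx key lines with
  | none => simp
  | some m =>
      cases m with
      | zero =>
          rcases lines with _ | ⟨h, t⟩
          · simp [pvFindIdx] at hfi
          · have hins : PySem.List.insert (h :: t) (0 : Int) c = c :: h :: t :=
              PySem.List.insert_zero (h :: t) c
            simp [hins]
      | succ k =>
          have hlen : k + 1 ≤ lines.length := Nat.le_of_lt (pvFindIdx_lt_length key lines _ hfi)
          simp [pvPatchA, List.getD]
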